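-- pv_equiv track=rewrite | github.com/smiley/WowDiscordRichPresence | main.py | iterate_pixels
-- ===== SOURCE A (Python) =====
-- def get_channel_index(channel):
--     if channel.lower() == 'r':
--         return 0
--     elif channel.lower() == 'g':
--         return 1
--     elif channel.lower() == 'b':
--         return 2
--     else:
--         raise ValueError("Unknown color channel: {0}".format(channel))
--
-- def iterate_pixels(pixels, channel):
--     line = ""
--     wait_for_null = False
--     channel_index = get_channel_index(channel)
--
--     for p in pixels:
--         channels = p
--         character_ordinal = channels[channel_index]
--         if character_ordinal == 0:
--             # We've reached a null separator; look for a character again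
--             wait_for_null = False
--         elif wait_for_null is False:
--             # Cool, this is a character. Due to UI Scale, this character may repeat immediately
--             # afterwards. Thus, wait for a null separator before continuing to parse.
--             line += chr(character_ordinal)
--             wait_for_null = True
--
--     return line
-- ===== SOURCE B (Python) =====
-- def get_channel_index(channel):
--     if channel.lower() == 'r':
--         return 0
--     elif channel.lower() == 'g':
--         return 1
--     elif channel.lower() == 'b':
--         return 2
--     else:
--         raise ValueError("Unknown color channel: {0}".format(channel))
--
-- def iterate_pixels(pixels, channel):
--     channel_index = get_channel_index(channel)
--     vals = [p[channel_index] for p in pixels]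
--     out = []
--     i, n = 0, len(vals)
--     while i < n:
--         while i < n and vals[i] == 0:      # skip the null separators
--             i += 1
--         if i < n:                          # i is at the head of a maximal nonzero run
--             out.append(chr(vals[i]))
--             while i < n and vals[i] != 0:  # skip the rest of that run
--                 i += 1
--     return "".join(out)
-- ===== Notes on version B (the rewrite author's own statement) =====
-- stated objective: alternative
-- what changed: Replaces A's per-pixel wait_for_null flag machine with a run-skipping two-level scan: an outer loop that repeatedly skips a block of null separators, emits chr of the head of the next nonzero run, and then skips the rest of that run.
import Mathlib
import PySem

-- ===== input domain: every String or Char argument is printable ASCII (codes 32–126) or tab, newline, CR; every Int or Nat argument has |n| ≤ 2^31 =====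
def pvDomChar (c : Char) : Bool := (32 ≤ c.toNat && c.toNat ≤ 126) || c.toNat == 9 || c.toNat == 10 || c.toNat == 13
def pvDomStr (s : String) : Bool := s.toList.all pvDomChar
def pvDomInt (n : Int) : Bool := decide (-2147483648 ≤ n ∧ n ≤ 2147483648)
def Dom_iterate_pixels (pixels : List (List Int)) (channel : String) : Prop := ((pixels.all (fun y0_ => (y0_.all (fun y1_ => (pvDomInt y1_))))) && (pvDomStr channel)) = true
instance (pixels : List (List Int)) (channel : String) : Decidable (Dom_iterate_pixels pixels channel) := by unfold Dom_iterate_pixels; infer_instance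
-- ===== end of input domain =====

-- B replaces A's per-pixel wait_for_null flag machine with a run-skipping two-level scan
-- (skip null separators, emit the head of the next nonzero run, skip that run); objective:
-- alternative decomposition, same cost.

-- ===== PORT A =====
-- helper: get_channel_index; 'none' = the ValueError branch (excluded by Pre_)
def get_channel_index (channel : String) : Option Int :=
  if PySem.Str.lower channel = "r" then some 0
  else if PySem.Str.lower channel = "g" then some 1
  else if PySem.Str.lower channel = "b" then some 2
  else none

def iterate_pixels (pixels : List (List Int)) (channel : String) : String :=
  match get_channel_index channel with
  | none => ""          -- ValueError: excluded by Pre_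
  | some channel_index =>
    let st := pixels.foldl (fun (st : List Char × Bool) p =>
      -- channels[channel_index]: IndexError (none) excluded by Pre_;
      -- chr(v): ported as Char.ofNat v.toNat, exact on Pre_'s valid code points
      let character_ordinal := (PySem.List.pyGet? p channel_index).getD 0
      if character_ordinal = 0 then (st.1, false)
      else if st.2 = false then (st.1 ++ [Char.ofNat character_ordinal.toNat], true)
      else st) ([], false)
    String.mk st.1

-- ===== PORT B =====
def get_channel_index_alt (channel : String) : Option Int :=
  if PySem.Str.lower channel = "r" then some 0
  else if PySem.Str.lower channel = "g" then some 1
  else if PySem.Str.lower channel = "b" then some 2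
  else none

-- Source B's inner 'while vals[i] == 0: i += 1' loop, transcribed on the suffix vals[i:]
def skipZerosB : List Int → List Int
  | [] => []
  | v :: rest => if v = 0 then skipZerosB rest else v :: rest

-- Source B's inner 'while vals[i] != 0: i += 1' loop, transcribed on the suffix vals[i:]
def skipRunB : List Int → List Int
  | [] => []
  | v :: rest => if v = 0 then v :: rest else skipRunB rest

theorem skipZerosB_len : ∀ l : List Int, (skipZerosB l).length ≤ l.length := by
  intro l; induction l with
  | nil => simp [skipZerosB]
  | cons v rest ih => simp only [skipZerosB]; split_ifs <;> simp <;> omega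

theorem skipRunB_len : ∀ l : List Int, (skipRunB l).length ≤ l.length := by
  intro l; induction l with
  | nil => simp [skipRunB]
  | cons v rest ih => simp only [skipRunB]; split_ifs <;> simp <;> omega

-- Source B's outer while loop: the index i advances through the suffixes of vals
def decodeRunsB (vals : List Int) : List Char :=
  match h : skipZerosB vals with
  | [] => []
  | v :: rest => Char.ofNat v.toNat :: decodeRunsB (skipRunB rest)
termination_by vals.length
decreasing_by
  have h1 := skipZerosB_len vals
  have h2 := skipRunB_len rest
  rw [h] at h1; simp at h1; omega

def iterate_pixels_alt (pixels : List (List Int)) (channel : String) : String :=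
  match get_channel_index_alt channel with
  | none => ""          -- ValueError: excluded by Pre_
  | some channel_index =>
    String.mk (decodeRunsB (pixels.map (fun p => (PySem.List.pyGet? p channel_index).getD 0)))

-- ===== PRECONDITION & SPEC =====
-- Pre_ excludes: an unknown channel (ValueError), a pixel shorter than the channel index
-- (IndexError), and run-start channel values outside chr's domain — negative or ≥ 0x110000
-- (ValueError) — or a surrogate code point, where A returns a string not representable as a
-- Lean String.  chr is applied exactly to the first value of each maximal nonzero run.
def Pre_iterate_pixels (pixels : List (List Int)) (channel : String) : Prop :=
  (PySem.Str.lower channel = "r" ∨ PySem.Str.lower channel = "g" ∨ PySem.Str.lower channel = "b") ∧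
  (let ci : Int := if PySem.Str.lower channel = "r" then 0
                   else if PySem.Str.lower channel = "g" then 1 else 2
   (∀ p ∈ pixels, ci < (p.length : Int)) ∧
   (∀ i ∈ List.range pixels.length,
      let v := (PySem.List.pyGet? (pixels.getD i []) ci).getD 0
      (v ≠ 0 ∧ (i = 0 ∨ (PySem.List.pyGet? (pixels.getD (i - 1) []) ci).getD 0 = 0)) →
      0 ≤ v ∧ (v < 55296 ∨ (57343 < v ∧ v < 1114112))))
instance (pixels : List (List Int)) (channel : String) : Decidable (Pre_iterate_pixels pixels channel) := by
  unfold Pre_iterate_pixels; infer_instance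

def pvWitness_iterate_pixels : List (List Int) × String := ([[72], [72], [0], [105]], "r")

def Spec_iterate_pixels (pixels : List (List Int)) (channel : String) (out : String) : Prop := out = iterate_pixels_alt pixels channel
instance (pixels : List (List Int)) (channel : String) (out : String) : Decidable (Spec_iterate_pixels pixels channel out) := by unfold Spec_iterate_pixels; infer_instance

-- ===== CLAIM (what is proved, stated in full; the proofs are below) =====
def Claim_equal_iterate_pixels : Prop := ∀ (pixels : List (List Int)) (channel : String), Dom_iterate_pixels pixels channel → Pre_iterate_pixels pixels channel → Spec_iterate_pixels pixels channel (iterate_pixels pixels channel)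

-- ===== LEMMAS AND PROOFS =====

-- A's loop step on the value stream
def pvStepA (st : List Char × Bool) (v : Int) : List Char × Bool :=
  if v = 0 then (st.1, false)
  else if st.2 = false then (st.1 ++ [Char.ofNat v.toNat], true)
  else st

-- With the wait_for_null flag set, A's loop just skips the current nonzero run.
theorem pv_foldl_true (vals : List Int) : ∀ acc : List Char,
    vals.foldl pvStepA (acc, true) = (skipRunB vals).foldl pvStepA (acc, true) := by
  induction vals with
  | nil => intro acc; simp [skipRunB]
  | cons v rest ih =>
    intro acc
    by_cases hv : v = 0 <;> simp [skipRunB, pvStepA, hv, ih]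

-- unfolding lemmas for decodeRunsB
theorem decodeRunsB_eq (l : List Int) : decodeRunsB l =
    (match skipZerosB l with
     | [] => []
     | v :: rest => Char.ofNat v.toNat :: decodeRunsB (skipRunB rest)) := by
  rw [decodeRunsB]
  rcases hsz : skipZerosB l with _ | ⟨v, rest⟩ <;> simp

theorem decodeRunsB_zero (v : Int) (rest : List Int) (hv : v = 0) :
    decodeRunsB (v :: rest) = decodeRunsB rest := by
  rw [decodeRunsB_eq, decodeRunsB_eq, show skipZerosB (v :: rest) = skipZerosB rest by
    simp [skipZerosB, hv]]

theorem decodeRunsB_pos (v : Int) (rest : List Int) (hv : ¬ v = 0) :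
    decodeRunsB (v :: rest) = Char.ofNat v.toNat :: decodeRunsB (skipRunB rest) := by
  rw [decodeRunsB_eq, show skipZerosB (v :: rest) = v :: rest by simp [skipZerosB, hv]]

-- skipRunB stops at the first null (or the end of the stream)
theorem skipRunB_head (rest : List Int) : skipRunB rest = [] ∨ (skipRunB rest).headI = 0 := by
  induction rest with
  | nil => simp [skipRunB]
  | cons x xs ihx => by_cases hx : x = 0 <;> simp [skipRunB, hx, ihx]

-- With the flag clear, A's loop emits exactly one character per maximal nonzero run,
-- i.e. B's run-skipping decomposition.
theorem pv_foldl_false (vals : List Int) : ∀ acc : List Char,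
    (vals.foldl pvStepA (acc, false)).1 = acc ++ decodeRunsB vals := by
  induction hn : vals.length using Nat.strong_induction_on generalizing vals with
  | _ n ih =>
    intro acc
    match vals with
    | [] => simp [decodeRunsB, skipZerosB]
    | v :: rest =>
      by_cases hv : v = 0
      · have hlt : rest.length < n := by simp at hn; omega
        have h := ih rest.length hlt rest rfl acc
        have hstep : pvStepA (acc, false) v = (acc, false) := by simp [pvStepA, hv]
        rw [List.foldl_cons, hstep, h, decodeRunsB_zero v rest hv]
      · have hlen : (skipRunB rest).length < n := by
          have := skipRunB_len rest; simp at hn; omega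
        have hskip := pv_foldl_true rest (acc ++ [Char.ofNat v.toNat])
        have h := ih (skipRunB rest).length hlen (skipRunB rest) rfl (acc ++ [Char.ofNat v.toNat])
        have hstep : pvStepA (acc, false) v = (acc ++ [Char.ofNat v.toNat], true) := by
          simp [pvStepA, hv]
        have heq : ((skipRunB rest).foldl pvStepA (acc ++ [Char.ofNat v.toNat], true)).1
            = ((skipRunB rest).foldl pvStepA (acc ++ [Char.ofNat v.toNat], false)).1 := by
          cases hsr : skipRunB rest with
          | nil => rfl
          | cons x xs =>
            have hx : x = 0 := by
              rcases skipRunB_head rest with h0 | h0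
              · rw [h0] at hsr; cases hsr
              · rw [hsr] at h0; simpa using h0
            subst hx
            simp [pvStepA]
        rw [List.foldl_cons, hstep, hskip, heq, h, decodeRunsB_pos v rest hv]
        simp

-- ===== VERDICT (by name: the statement is the Claim_ definition above) =====
theorem iterate_pixels_spec : Claim_equal_iterate_pixels := by
  intro pixels channel _ _
  unfold Spec_iterate_pixels iterate_pixels iterate_pixels_alt
  have hgci : get_channel_index_alt channel = get_channel_index channel := rfl
  rw [hgci]
  cases h : get_channel_index channel with
  | none => rfl
  | some ci =>
    refine congrArg String.mk ?_
    have h2 := pv_foldl_false (pixels.map (fun p => (PySem.List.pyGet? p ci).getD 0)) []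
    rw [List.foldl_map] at h2
    simpa [pvStepA] using h2
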